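-- pv_equiv track=rewrite | github.com/ChrisK15/leetcode-practice | codepath/TIP102/unit_2/session_2/advanced_set_1/problem_3.py | organize_exhibition
-- ===== SOURCE A (Python) =====
-- from collections import Counter
--
-- def organize_exhibition(collection):
--     d = Counter(collection)
--     max_freq = max(d.values())
--     result = []
--     for i in range(max_freq):
--         result.append([])
--     for key, freq in d.items():
--         for row_index in range(freq):
--             result[row_index].append(key)
--     return result
-- ===== SOURCE B (Python) =====
-- from collections import Counter
--
-- def organize_exhibition(collection):
--     d = Counter(collection)
--     max_freq = max(d.values(), default=0)
--     return [[key for key, freq in d.items() if freq > i] for i in range(max_freq)]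
-- ===== Notes on version B (the rewrite author's own statement) =====
-- stated objective: simpler
-- what changed: B reverses the loop nesting: instead of preallocating empty rows and scattering each key into rows 0..freq-1 by index mutation, B builds each row directly as a filter of the counted items with freq > row index; rows come out identical in Counter order.
import Mathlib
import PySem

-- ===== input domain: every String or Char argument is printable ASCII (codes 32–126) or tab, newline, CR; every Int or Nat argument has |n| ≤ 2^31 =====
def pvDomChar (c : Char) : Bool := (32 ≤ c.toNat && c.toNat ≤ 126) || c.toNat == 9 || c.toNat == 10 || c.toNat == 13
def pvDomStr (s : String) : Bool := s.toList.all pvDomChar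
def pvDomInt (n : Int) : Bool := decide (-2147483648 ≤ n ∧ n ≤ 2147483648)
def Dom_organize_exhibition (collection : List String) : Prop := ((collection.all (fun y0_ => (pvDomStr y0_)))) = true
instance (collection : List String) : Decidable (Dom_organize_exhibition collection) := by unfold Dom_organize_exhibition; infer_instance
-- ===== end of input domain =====

-- B reverses the loop nesting (row-first filter of the counted items instead of scatter-by-index into
-- preallocated rows): objective 'simpler'. Return values agree on every non-empty input (A raises on []).

-- ===== PORT A =====
-- result[row_index].append(key) is ported as set/getD on the row list; this is exact because
-- 0 ≤ row_index < freq ≤ max_freq = result length, so the index is always in range.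
def organize_exhibition (collection : List String) : List (List String) :=
  let d := PySem.Dict.counter collection
  match PySem.List.max? d.values (fun y => y) with
  | none => []  -- Python raises ValueError here (empty collection); excluded by Pre_
  | some max_freq =>
    let result : List (List String) :=
      (PySem.List.pyRange 0 max_freq).foldl (fun r _ => r ++ [[]]) []
    d.items.foldl (fun r p =>
      (PySem.List.pyRange 0 p.2).foldl
        (fun r i => r.set i.toNat (r.getD i.toNat [] ++ [p.1])) r) result

-- ===== PORT B =====
def organize_exhibition_alt (collection : List String) : List (List String) :=
  let d := PySem.Dict.counter collection
  let max_freq := PySem.List.maxD d.values (fun y => y) 0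
  (PySem.List.pyRange 0 max_freq).map (fun i =>
    (d.items.filter (fun p => decide (i < p.2))).map (fun p => p.1))

-- ===== PRECONDITION & SPEC =====
-- Pre_ excludes exactly the empty list, on which A's max(d.values()) raises ValueError.
def Pre_organize_exhibition (collection : List String) : Prop := collection ≠ []
instance (collection : List String) : Decidable (Pre_organize_exhibition collection) := by unfold Pre_organize_exhibition; infer_instance
def pvWitness_organize_exhibition : List String := ["a", "b", "a", "c", "a"]

def Spec_organize_exhibition (collection : List String) (out : List (List String)) : Prop := out = organize_exhibition_alt collection
instance (collection : List String) (out : List (List String)) : Decidable (Spec_organize_exhibition collection out) := by unfold Spec_organize_exhibition; infer_instance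

-- ===== CLAIM (what is proved, stated in full; the proofs are below) =====
def Claim_equal_organize_exhibition : Prop := ∀ (collection : List String), Dom_organize_exhibition collection → Pre_organize_exhibition collection → Spec_organize_exhibition collection (organize_exhibition collection)

-- ===== LEMMAS AND PROOFS =====

-- A's inner loop: appending k to rows 0..n-1 is a mapIdx over the row list.
lemma inner_loop_eq (k : String) : ∀ (n : Nat) (r : List (List String)), n ≤ r.length →
    (PySem.List.pyRange 0 (n : Int)).foldl
      (fun r i => r.set i.toNat (r.getD i.toNat [] ++ [k])) r
      = r.mapIdx (fun j row => if j < n then row ++ [k] else row) := by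
  intro n
  induction n with
  | zero =>
    intro r _
    have h0 : PySem.List.pyRange 0 ((0 : Nat) : Int) = [] := by decide
    rw [h0]
    simp only [List.foldl_nil]
    apply List.ext_getElem (by simp)
    intro j h1 h2
    simp [List.getElem_mapIdx]
  | succ n ih =>
    intro r hle
    have hcast : (((n + 1 : Nat)) : Int) = (n : Int) + 1 := by push_cast; ring
    rw [hcast, PySem.List.pyRange_one_succ_right (by positivity), List.foldl_append]
    rw [ih r (by omega)]
    simp only [List.foldl_cons, List.foldl_nil]
    have htn : ((n : Int)).toNat = n := by omega
    rw [htn]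
    have hn : n < (r.mapIdx (fun j row => if j < n then row ++ [k] else row)).length := by
      simp [List.length_mapIdx]; omega
    rw [List.getD_eq_getElem _ _ hn]
    apply List.ext_getElem (by simp)
    intro j h1 h2
    simp only [List.getElem_set, List.getElem_mapIdx]
    by_cases hj : n = j
    · subst hj
      simp
    · simp only [if_neg hj]
      by_cases hjn : j < n
      · have h3 : j < n + 1 := by omega
        simp [hjn, h3]
      · have h3 : ¬ j < n + 1 := by omega
        simp [hjn, h3]

-- A's outer loop: folding the scatter over the items is a mapIdx by a per-row filter.
lemma outer_loop_eq : ∀ (l : List (String × Int)) (r : List (List String)),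
    (∀ p ∈ l, 0 < p.2 ∧ p.2.toNat ≤ r.length) →
    l.foldl (fun r p =>
      (PySem.List.pyRange 0 p.2).foldl
        (fun r i => r.set i.toNat (r.getD i.toNat [] ++ [p.1])) r) r
      = r.mapIdx (fun j row => row ++ (l.filter (fun p => decide ((j : Int) < p.2))).map (fun p => p.1)) := by
  intro l
  induction l with
  | nil =>
    intro r _
    simp only [List.foldl_nil, List.filter_nil, List.map_nil, List.append_nil]
    apply List.ext_getElem (by simp)
    intro j h1 h2
    simp [List.getElem_mapIdx]
  | cons p t ih =>
    intro r h
    obtain ⟨hp1, hp2⟩ := h p (by simp)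
    simp only [List.foldl_cons]
    have hc : p.2 = ((p.2.toNat : Nat) : Int) := by omega
    rw [hc, inner_loop_eq p.1 p.2.toNat r hp2]
    rw [ih _ (by
      intro q hq
      refine ⟨(h q (by simp [hq])).1, ?_⟩
      have := (h q (by simp [hq])).2
      simpa [List.length_mapIdx] using this)]
    rw [List.mapIdx_mapIdx]
    apply List.ext_getElem (by simp)
    intro j h1 h2
    simp only [List.getElem_mapIdx, List.filter_cons, Function.comp]
    have hiff : (j < p.2.toNat) ↔ ((j : Int) < p.2) := by omega
    by_cases hj : (j : Int) < p.2
    · rw [if_pos (hiff.mpr hj), if_pos (by simpa using hj)]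
      simp
    · rw [if_neg (fun hh => hj (hiff.mp hh)), if_neg (by simpa using hj)]

-- ===== VERDICT (by name: the statement is the Claim_ definition above) =====
theorem organize_exhibition_spec : Claim_equal_organize_exhibition := by
  intro c _ hpre
  unfold Spec_organize_exhibition
  have hvals : (PySem.Dict.counter c).values
      = (PySem.Set.ofList c).map (fun k => ((c.count k : Nat) : Int)) := by
    have := PySem.Dict.items_counter c
    simp [PySem.Dict.values, this, List.map_map, Function.comp]
  have hvne : (PySem.Dict.counter c).values ≠ [] := by
    rw [hvals]
    intro hnil
    rcases List.exists_mem_of_ne_nil c hpre with ⟨x, hx⟩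
    have hxs : x ∈ PySem.Set.ofList c := (PySem.Set.mem_ofList c x).mpr hx
    rw [List.map_eq_nil_iff.mp hnil] at hxs
    simp at hxs
  obtain ⟨m, hm⟩ : ∃ m, PySem.List.max? (PySem.Dict.counter c).values (fun y => y) = some m := by
    cases hmm : PySem.List.max? (PySem.Dict.counter c).values (fun y => y) with
    | none => exact absurd ((PySem.List.max?_eq_none_iff _ _).mp hmm) hvne
    | some m => exact ⟨m, rfl⟩
  have hmval : m ∈ (PySem.Dict.counter c).values := PySem.List.max?_mem hm
  have hmpos : 1 ≤ m := by
    rw [hvals] at hmval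
    rcases List.mem_map.mp hmval with ⟨k, hk, hkm⟩
    have hkc : k ∈ c := (PySem.Set.mem_ofList c k).mp hk
    have : 1 ≤ c.count k := List.one_le_count_iff.mpr hkc
    omega
  have hmaxD : PySem.List.maxD (PySem.Dict.counter c).values (fun y => y) 0 = m := by
    simp [PySem.List.maxD, hm]
  simp only [organize_exhibition, organize_exhibition_alt, hm, hmaxD]
  -- the preallocation loop builds a list of pyRange-length empty rows
  have hinit : (PySem.List.pyRange 0 m).foldl (fun r _ => r ++ [([] : List String)]) []
      = (PySem.List.pyRange 0 m).map (fun _ => ([] : List String)) := by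
    exact (PySem.List.foldl_append_singleton_eq_map
      (fun _ : Int => ([] : List String)) (PySem.List.pyRange 0 m) []).trans (by simp)
  rw [hinit]
  have hmn : m = ((m.toNat : Nat) : Int) := by omega
  have hrange : PySem.List.pyRange 0 m = List.map (fun k : Nat => (k : Int)) (List.range m.toNat) := by
    conv_lhs => rw [hmn]
    exact PySem.List.pyRange_zero_natCast m.toNat
  have hlen : (PySem.List.pyRange 0 m).length = m.toNat := by
    rw [hrange]; simp
  rw [outer_loop_eq _ _ ?hcond]
  case hcond =>
    intro p hp
    have hpv : p.2 ∈ (PySem.Dict.counter c).values := by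
      simp only [PySem.Dict.values]
      exact List.mem_map.mpr ⟨p, hp, rfl⟩
    constructor
    · rw [hvals] at hpv
      rcases List.mem_map.mp hpv with ⟨k, hk, hkm⟩
      have hkc : k ∈ c := (PySem.Set.mem_ofList c k).mp hk
      have : 1 ≤ c.count k := List.one_le_count_iff.mpr hkc
      omega
    · have hle : p.2 ≤ m := PySem.List.max?_isMax hm p.2 hpv
      simp only [List.length_map, hlen]
      omega
  apply List.ext_getElem (by simp [List.length_mapIdx])
  intro j h1 h2
  simp only [List.getElem_mapIdx, List.getElem_map]
  have : (PySem.List.pyRange 0 m)[j]'(by simpa [List.length_mapIdx, List.length_map] using h1) = (j : Int) := by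
    rw [List.getElem_of_eq hrange]
    simp
  rw [this]
  simp
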